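-- pv_equiv track=rewrite | github.com/soyukke/lean-unsolved | scripts/erdos89_optimization.py | square_grid
-- ===== SOURCE A (Python) =====
-- import math
--
-- def square_grid(n):
--     """√n × √n 正方格子から n 点を選ぶ"""
--     side = math.isqrt(n)
--     if side * side < n:
--         side += 1
--     points = []
--     for y in range(side):
--         for x in range(side):
--             points.append((x, y))
--             if len(points) == n:
--                 return points
--     return points
-- ===== SOURCE B (Python) =====
-- import math
--
-- def square_grid(n):
--     """√n × √n 正方格子から n 点を選ぶ"""
--     side = math.isqrt(n)
--     if side * side < n:
--         side += 1
--     return [(i % side, i // side) for i in range(n)]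
-- ===== Notes on version B (the rewrite author's own statement) =====
-- stated objective: simpler
-- what changed: Replaced the nested y/x loops with the length==n early return by a single comprehension mapping each flat index i to (i % side, i // side).
import Mathlib
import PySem

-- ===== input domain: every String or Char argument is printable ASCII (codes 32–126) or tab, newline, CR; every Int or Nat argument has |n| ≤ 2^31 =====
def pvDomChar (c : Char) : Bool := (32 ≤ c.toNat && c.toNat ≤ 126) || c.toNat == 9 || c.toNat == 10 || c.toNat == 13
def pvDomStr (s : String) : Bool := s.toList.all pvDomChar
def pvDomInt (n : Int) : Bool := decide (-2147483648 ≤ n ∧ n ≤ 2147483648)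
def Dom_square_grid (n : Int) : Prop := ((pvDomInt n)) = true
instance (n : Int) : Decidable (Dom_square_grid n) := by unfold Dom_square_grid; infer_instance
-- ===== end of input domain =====

-- B replaces A's nested y/x loops with the early return by one flat map i ↦ (i % side, i // side); objective: simpler.

-- ===== PORT A =====
-- inner 'for x in xs': append (x, y); early return (flag true) when len(points) == n
def sgInner (y n : Int) : List Int → List (Int × Int) → List (Int × Int) × Bool
  | [], pts => (pts, false)
  | x :: xs, pts =>
      let pts' := pts ++ [(x, y)]
      if (pts'.length : Int) = n then (pts', true) else sgInner y n xs pts'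

-- outer 'for y in range(side)': propagate the early return
def sgOuter (side n : Int) : List Int → List (Int × Int) → List (Int × Int)
  | [], pts => pts
  | y :: ys, pts =>
      match sgInner y n (PySem.List.pyRange 0 side 1) pts with
      | (pts', true) => pts'
      | (pts', false) => sgOuter side n ys pts'

def square_grid (n : Int) : List (Int × Int) :=
  let side0 : Int := ((Nat.sqrt n.toNat : Nat) : Int)   -- math.isqrt(n), n ≥ 0 by Pre_
  let side : Int := if side0 * side0 < n then side0 + 1 else side0
  sgOuter side n (PySem.List.pyRange 0 side 1) []

-- ===== PORT B =====
def square_grid_alt (n : Int) : List (Int × Int) :=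
  let side0 : Int := ((Nat.sqrt n.toNat : Nat) : Int)   -- math.isqrt(n), n ≥ 0 by Pre_
  let side : Int := if side0 * side0 < n then side0 + 1 else side0
  (PySem.List.pyRange 0 n 1).map (fun i => (PySem.Int.mod i side, PySem.Int.floordiv i side))

-- ===== PRECONDITION & SPEC =====
-- math.isqrt raises ValueError on negative n; Pre_ excludes exactly n < 0.
def Pre_square_grid (n : Int) : Prop := 0 ≤ n
instance (n : Int) : Decidable (Pre_square_grid n) := by unfold Pre_square_grid; infer_instance
def pvWitness_square_grid : Int := (7)

def Spec_square_grid (n : Int) (out : List (Int × Int)) : Prop := out = square_grid_alt n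
instance (n : Int) (out : List (Int × Int)) : Decidable (Spec_square_grid n out) := by unfold Spec_square_grid; infer_instance

-- ===== CLAIM (what is proved, stated in full; the proofs are below) =====
def Claim_equal_square_grid : Prop := ∀ (n : Int), Dom_square_grid n → Pre_square_grid n → Spec_square_grid n (square_grid n)

-- ===== LEMMAS AND PROOFS =====

-- flat index i ↦ row-major coordinate, Nat level
def sgCoord (s i : Nat) : Int × Int := (((i % s : Nat) : Int), ((i / s : Nat) : Int))

theorem sgInner_eq (y : Int) (xs : List Int) :
    ∀ (pts : List (Int × Int)) (need : Nat), 0 < need →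
    sgInner y ((pts.length + need : Nat) : Int) xs pts =
      if need ≤ xs.length
      then (pts ++ (xs.take need).map (fun x => (x, y)), true)
      else (pts ++ xs.map (fun x => (x, y)), false) := by
  induction xs with
  | nil =>
      intro pts need hpos
      simp [sgInner]
      omega
  | cons x xs ih =>
      intro pts need hpos
      simp only [sgInner]
      by_cases h1 : need = 1
      · subst h1
        have : ((pts ++ [(x, y)]).length : Int) = ((pts.length + 1 : Nat) : Int) := by
          simp
        rw [if_pos this]
        simp
      · have hne : ¬ (((pts ++ [(x, y)]).length : Int) = ((pts.length + need : Nat) : Int)) := by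
          simp; omega
        rw [if_neg hne]
        have hrw : ((pts.length + need : Nat) : Int)
            = (((pts ++ [(x, y)]).length + (need - 1) : Nat) : Int) := by
          simp; omega
        rw [hrw, ih (pts ++ [(x, y)]) (need - 1) (by omega)]
        have htk : (x :: xs).take need = x :: xs.take (need - 1) := by
          cases need with
          | zero => omega
          | succ m => simp
        by_cases h2 : need - 1 ≤ xs.length
        · rw [if_pos h2, if_pos (by simp; omega)]
          simp [htk]
        · rw [if_neg h2, if_neg (by simp; omega)]
          simp

theorem sgOuter_eq (s : Nat) (hs : 0 < s) (N : Nat) (hN : N ≤ s * s) :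
    ∀ (k j : Nat), s - j = k → j * s < N →
    sgOuter (s : Int) (N : Int) (PySem.List.pyRange (j : Int) (s : Int) 1)
        ((List.range (j * s)).map (sgCoord s)) =
      (List.range N).map (sgCoord s) := by
  intro k
  induction k with
  | zero =>
      intro j hk hjN
      exfalso
      have h1 : s ≤ j := by omega
      have h2 : s * s ≤ j * s := Nat.mul_le_mul_right s h1
      omega
  | succ k ih =>
      intro j hk hjN
      have hjs : j < s := by omega
      rw [PySem.List.pyRange_one_cons (by exact_mod_cast hjs)]
      simp only [sgOuter]
      have hlen : ((List.range (j * s)).map (sgCoord s)).length = j * s := by simp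
      have hneed : 0 < N - j * s := by omega
      have hNrw : (N : Int) = ((((List.range (j * s)).map (sgCoord s)).length + (N - j * s) : Nat) : Int) := by
        rw [hlen]; congr 1; omega
      have hI := sgInner_eq ((j : Nat) : Int) (PySem.List.pyRange 0 (s : Int) 1)
            ((List.range (j * s)).map (sgCoord s)) (N - j * s) hneed
      have hrlen : (PySem.List.pyRange 0 (s : Int) 1).length = s := by
        rw [PySem.List.length_pyRange_one]; simp
      rw [hrlen] at hI
      have hrange : PySem.List.pyRange 0 (s : Int) 1 = (List.range s).map (fun (m : Nat) => (m : Int)) := by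
        rw [PySem.List.pyRange_one]; simp only [sub_zero, Int.toNat_natCast, zero_add]
      by_cases hcase : N - j * s ≤ s
      · rw [if_pos hcase] at hI
        rw [hNrw, hI]
        dsimp only
        have hsplit : N = j * s + (N - j * s) := by omega
        conv_rhs => rw [hsplit, List.range_add, List.map_append]
        congr 1
        rw [hrange, ← List.map_take, List.take_range, List.map_map, List.map_map,
            min_eq_left hcase]
        apply List.map_congr_left
        intro m hm
        have hm' : m < N - j * s := List.mem_range.mp hm
        have hmlt : m < s := by omega
        simp only [sgCoord, Function.comp]
        have h1 : (j * s + m) % s = m := by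
          rw [Nat.mul_comm j s, Nat.mul_add_mod, Nat.mod_eq_of_lt hmlt]
        have h2 : (j * s + m) / s = j := by
          rw [Nat.mul_comm j s, Nat.mul_add_div hs, Nat.div_eq_of_lt hmlt, Nat.add_zero]
        rw [h1, h2]
      · rw [if_neg hcase] at hI
        rw [hNrw, hI]
        dsimp only
        rw [← hNrw]
        have hpts' : (List.range (j * s)).map (sgCoord s)
              ++ (PySem.List.pyRange 0 (s : Int) 1).map (fun x => (x, ((j : Nat) : Int)))
            = (List.range ((j + 1) * s)).map (sgCoord s) := by
          have he : (j + 1) * s = j * s + s := by ring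
          rw [he, List.range_add, List.map_append]
          congr 1
          rw [hrange, List.map_map, List.map_map]
          apply List.map_congr_left
          intro m hm
          have hmlt : m < s := List.mem_range.mp hm
          simp only [sgCoord, Function.comp]
          have h1 : (j * s + m) % s = m := by
            rw [Nat.mul_comm j s, Nat.mul_add_mod, Nat.mod_eq_of_lt hmlt]
          have h2 : (j * s + m) / s = j := by
            rw [Nat.mul_comm j s, Nat.mul_add_div hs, Nat.div_eq_of_lt hmlt, Nat.add_zero]
          rw [h1, h2]
        rw [hpts']
        have hcast : ((j : Nat) : Int) + 1 = (((j + 1 : Nat)) : Int) := by push_cast; ring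
        rw [hcast]
        have he : (j + 1) * s = j * s + s := by ring
        exact ih (j + 1) (by omega) (by omega)

-- ===== VERDICT (by name: the statement is the Claim_ definition above) =====
theorem square_grid_spec : Claim_equal_square_grid := by
  intro n _ hpre
  have hpre' : 0 ≤ n := hpre
  unfold Spec_square_grid square_grid square_grid_alt
  set n' : Nat := n.toNat with hn'
  have hn : n = (n' : Int) := by omega
  set r : Nat := Nat.sqrt n' with hr
  have hcond : ((r : Int) * (r : Int) < n) ↔ (r * r < n') := by
    rw [hn]; exact_mod_cast Iff.rfl
  set s : Nat := if r * r < n' then r + 1 else r with hsdef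
  have hside : (if ((r : Nat) : Int) * ((r : Nat) : Int) < n then ((r : Nat) : Int) + 1 else ((r : Nat) : Int)) = (s : Int) := by
    rw [hsdef]
    by_cases h : r * r < n'
    · rw [if_pos (hcond.mpr h), if_pos h]; push_cast; ring
    · rw [if_neg (fun hc => h (hcond.mp hc)), if_neg h]
  simp only [hside]
  have hNle : n' ≤ s * s := by
    rw [hsdef]
    by_cases h : r * r < n'
    · rw [if_pos h]
      have h1 := Nat.lt_succ_sqrt' n'
      have h2 : n' < (Nat.sqrt n' + 1) * (Nat.sqrt n' + 1) := by
        simpa [Nat.succ_eq_add_one, pow_two] using h1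
      rw [hr]
      omega
    · rw [if_neg h]; omega
  -- B's side, as a Nat-indexed map
  have hB : (PySem.List.pyRange 0 n 1).map (fun i => (PySem.Int.mod i (s : Int), PySem.Int.floordiv i (s : Int)))
      = (List.range n').map (sgCoord s) := by
    rw [hn, PySem.List.pyRange_one]
    simp [sgCoord, List.map_map, Function.comp, PySem.Int.mod_natCast, PySem.Int.floordiv_natCast]
  rw [hB]
  by_cases h0 : n' = 0
  · have hs0 : s = 0 := by
      rw [hsdef, hr, h0]; simp
    rw [hn, h0, hs0]
    simp [PySem.List.pyRange_one_eq_nil, sgOuter]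
  · have hs : 0 < s := by
      rcases Nat.eq_zero_or_pos s with h | h
      · exfalso; rw [h] at hNle; omega
      · exact h
    have := sgOuter_eq s hs n' hNle s 0 (by omega) (by omega)
    simp only [Nat.zero_mul, List.range_zero, List.map_nil, Nat.cast_zero] at this
    rw [hn]
    exact this
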